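-- pv_equiv track=rewrite | github.com/mnuman/advent-of-code | 2021/day22.py | cuboids
-- ===== SOURCE A (Python) =====
-- from collections import namedtuple
--
-- Point = namedtuple("Point", ["x", "y", "z"])
--
-- def f(c):
--     return -50 if c < -50 else 50 if c > 50 else c
--
-- def cuboids(x_min, x_max, y_min, y_max, z_min, z_max):
--     if any([x in range(x_min, x_max + 1) for x in range(-50, 51)]) and any(
--             [y in range(y_min, y_max + 1) for y in range(-50, 51)]) and any(
--             [z in range(z_min, z_max + 1) for z in range(-50, 51)]):
--         return [Point(x, y, z) for x in range(f(x_min), f(x_max) + 1) for y in range(f(y_min), f(y_max) + 1) for z in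
--                 range(f(z_min), f(z_max) + 1)]
--     else:
--         return []
-- ===== SOURCE B (Python) =====
-- from collections import namedtuple
--
-- Point = namedtuple("Point", ["x", "y", "z"])
--
-- def cuboids(x_min, x_max, y_min, y_max, z_min, z_max):
--     # Flat enumeration: one loop over the clamped volume, decoding each flat
--     # index into (x, y, z) with divmod, instead of three nested range loops.
--     xl, yl, zl = max(x_min, -50), max(y_min, -50), max(z_min, -50)
--     nx = min(x_max, 50) - xl + 1
--     ny = min(y_max, 50) - yl + 1
--     nz = min(z_max, 50) - zl + 1
--     if nx <= 0 or ny <= 0 or nz <= 0: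
--         return []
--     pts = []
--     for i in range(nx * ny * nz):
--         q, z = divmod(i, nz)
--         x, y = divmod(q, ny)
--         pts.append(Point(xl + x, yl + y, zl + z))
--     return pts
-- ===== Notes on version B (the rewrite author's own statement) =====
-- stated objective: alternative
-- what changed: Replaces the three 101-membership-test 'any' guards and the triple nested comprehension with a single flat loop over the clamped volume that decodes each flat index into (x,y,z) by divmod, after a closed-form per-axis intersection (max/min) computes the clamped extents.
import Mathlib
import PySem

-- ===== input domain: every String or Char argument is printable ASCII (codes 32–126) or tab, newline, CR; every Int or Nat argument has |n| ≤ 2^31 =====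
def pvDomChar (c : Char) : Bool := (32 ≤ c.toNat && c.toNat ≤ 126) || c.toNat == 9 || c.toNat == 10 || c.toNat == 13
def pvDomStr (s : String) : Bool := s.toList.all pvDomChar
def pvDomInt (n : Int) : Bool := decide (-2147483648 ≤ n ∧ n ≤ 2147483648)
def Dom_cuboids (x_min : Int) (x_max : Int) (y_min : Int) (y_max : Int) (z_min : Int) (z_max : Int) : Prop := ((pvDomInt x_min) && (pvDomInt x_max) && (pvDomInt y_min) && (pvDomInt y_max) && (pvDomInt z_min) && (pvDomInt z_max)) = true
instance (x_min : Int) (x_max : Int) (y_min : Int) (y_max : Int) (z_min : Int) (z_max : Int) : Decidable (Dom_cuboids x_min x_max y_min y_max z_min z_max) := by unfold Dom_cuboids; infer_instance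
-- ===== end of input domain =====

-- B replaces the any-scan guards and the triple nested comprehension by one flat loop over
-- the clamped volume, decoding each flat index into (x,y,z) with divmod; return values proved equal.

-- ===== PORT A =====
-- 'v in range(a, b)' (step 1) is arithmetic membership in Python; ported exactly as a <= v < b.
def pyInRange (v : Int) (a : Int) (b : Int) : Bool := decide (a ≤ v ∧ v < b)
def f_clamp (c : Int) : Int := if c < -50 then -50 else if c > 50 then 50 else c

def cuboids (x_min : Int) (x_max : Int) (y_min : Int) (y_max : Int) (z_min : Int) (z_max : Int) : List (Int × Int × Int) :=
  if (((PySem.List.pyRange (-50) 51 1).map (fun x => pyInRange x x_min (x_max + 1))).any id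
      && ((PySem.List.pyRange (-50) 51 1).map (fun y => pyInRange y y_min (y_max + 1))).any id
      && ((PySem.List.pyRange (-50) 51 1).map (fun z => pyInRange z z_min (z_max + 1))).any id) then
    (PySem.List.pyRange (f_clamp x_min) (f_clamp x_max + 1) 1).flatMap (fun x =>
      (PySem.List.pyRange (f_clamp y_min) (f_clamp y_max + 1) 1).flatMap (fun y =>
        (PySem.List.pyRange (f_clamp z_min) (f_clamp z_max + 1) 1).map (fun z => (x, y, z))))
  else []

-- ===== PORT B =====
def cuboids_alt (x_min : Int) (x_max : Int) (y_min : Int) (y_max : Int) (z_min : Int) (z_max : Int) : List (Int × Int × Int) :=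
  let xl := max x_min (-50); let yl := max y_min (-50); let zl := max z_min (-50)
  let nx := min x_max 50 - xl + 1
  let ny := min y_max 50 - yl + 1
  let nz := min z_max 50 - zl + 1
  if nx ≤ 0 ∨ ny ≤ 0 ∨ nz ≤ 0 then []
  else
    (PySem.List.pyRange 0 (nx * ny * nz) 1).foldl (fun pts i =>
      let q := PySem.Int.floordiv i nz
      let z := PySem.Int.mod i nz
      let x := PySem.Int.floordiv q ny
      let y := PySem.Int.mod q ny
      pts ++ [(xl + x, yl + y, zl + z)]) []

-- ===== PRECONDITION & SPEC =====
def Spec_cuboids (x_min : Int) (x_max : Int) (y_min : Int) (y_max : Int) (z_min : Int) (z_max : Int) (out : List (Int × Int × Int)) : Prop := out = cuboids_alt x_min x_max y_min y_max z_min z_max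
instance (x_min : Int) (x_max : Int) (y_min : Int) (y_max : Int) (z_min : Int) (z_max : Int) (out : List (Int × Int × Int)) : Decidable (Spec_cuboids x_min x_max y_min y_max z_min z_max out) := by unfold Spec_cuboids; infer_instance

-- ===== CLAIM (what is proved, stated in full; the proofs are below) =====
def Claim_equal_cuboids : Prop := ∀ (x_min : Int) (x_max : Int) (y_min : Int) (y_max : Int) (z_min : Int) (z_max : Int), Dom_cuboids x_min x_max y_min y_max z_min z_max → Spec_cuboids x_min x_max y_min y_max z_min z_max (cuboids x_min x_max y_min y_max z_min z_max)

-- ===== LEMMAS AND PROOFS =====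

-- A's any-scan guard on one axis equals the closed-form overlap test.
theorem guard_eq (a b : Int) :
    ((PySem.List.pyRange (-50) 51 1).map (fun v => pyInRange v a (b + 1))).any id
      = decide (max a (-50) ≤ min b 50) := by
  by_cases h : max a (-50) ≤ min b 50
  · simp only [h, decide_true, List.any_eq_true, List.mem_map, id]
    refine ⟨pyInRange (max a (-50)) a (b + 1), ⟨max a (-50), ?_, rfl⟩, ?_⟩
    · rw [PySem.List.mem_pyRange_one]; omega
    · simp only [pyInRange, decide_eq_true_eq]; omega
  · simp only [h, decide_false, List.any_eq_false, List.mem_map, id]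
    rintro x ⟨v, hv, rfl⟩
    rw [PySem.List.mem_pyRange_one] at hv
    simp only [pyInRange, decide_eq_true_eq, not_and, not_lt]
    omega

theorem f_clamp_lo (a b : Int) (h : max a (-50) ≤ min b 50) : f_clamp a = max a (-50) := by
  unfold f_clamp; split_ifs <;> omega

theorem f_clamp_hi (a b : Int) (h : max a (-50) ≤ min b 50) : f_clamp b = min b 50 := by
  unfold f_clamp; split_ifs <;> omega

-- flatMap of singletons is map.
theorem flatMap_single {α β : Type} (xs : List α) (f : α → β) :
    xs.flatMap (fun x => [f x]) = xs.map f := by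
  induction xs with
  | nil => rfl
  | cons a t ih => simp only [List.flatMap_cons, List.map_cons, ih]; rfl

-- Splitting List.range (n*m) into n blocks of m.
theorem range_mul_map {α : Type} (n m : Nat) (f : Nat → α) :
    (List.range (n * m)).map f
      = (List.range n).flatMap (fun i => (List.range m).map (fun j => f (i * m + j))) := by
  induction n with
  | zero => simp
  | succ n ih =>
    rw [Nat.succ_mul, List.range_add, List.map_append, ih, List.range_succ, List.flatMap_append]
    simp [List.map_map, Function.comp]

theorem flatMap_congr_mem {α β : Type} (xs : List α) (f g : α → List β)
    (h : ∀ x ∈ xs, f x = g x) : xs.flatMap f = xs.flatMap g := by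
  induction xs with
  | nil => rfl
  | cons a t ih =>
    simp only [List.flatMap_cons]
    rw [h a (List.mem_cons_self), ih (fun x hx => h x (List.mem_cons_of_mem a hx))]

-- Decoding a flat index (q*b + r, r < b) by Nat division.
theorem nat_decode (b q r : Nat) (hb : 0 < b) (hr : r < b) :
    (q * b + r) / b = q ∧ (q * b + r) % b = r := by
  rw [Nat.mul_comm q b]
  constructor
  · rw [Nat.mul_add_div hb, Nat.div_eq_of_lt hr, Nat.add_zero]
  · rw [Nat.mul_add_mod, Nat.mod_eq_of_lt hr]

-- The nested enumeration equals the flat-index enumeration, on nonempty clamped boxes.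
theorem flat_eq (xl xh yl yh zl zh : Int) (NX NY NZ : Nat)
    (hNX : ((NX : Nat) : Int) = xh - xl + 1) (hNY : ((NY : Nat) : Int) = yh - yl + 1)
    (hNZ : ((NZ : Nat) : Int) = zh - zl + 1) (hNYpos : 0 < NY) (hNZpos : 0 < NZ) :
    (PySem.List.pyRange xl (xh + 1) 1).flatMap (fun x =>
      (PySem.List.pyRange yl (yh + 1) 1).flatMap (fun y =>
        (PySem.List.pyRange zl (zh + 1) 1).map (fun z => ((x, y, z) : Int × Int × Int))))
    = (PySem.List.pyRange 0 ((xh - xl + 1) * (yh - yl + 1) * (zh - zl + 1)) 1).foldl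
        (fun pts i =>
          pts ++ [(xl + PySem.Int.floordiv (PySem.Int.floordiv i (zh - zl + 1)) (yh - yl + 1),
                   yl + PySem.Int.mod (PySem.Int.floordiv i (zh - zl + 1)) (yh - yl + 1),
                   zl + PySem.Int.mod i (zh - zl + 1))]) [] := by
  have hN : (xh - xl + 1) * (yh - yl + 1) * (zh - zl + 1) = ((NX * (NY * NZ) : Nat) : Int) := by
    push_cast; rw [hNX, hNY, hNZ]; ring
  rw [hN, PySem.List.foldl_append_eq_flatMap, List.nil_append, PySem.List.pyRange_zero_natCast,
    List.flatMap_map, flatMap_single, range_mul_map NX (NY * NZ)]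
  have ex : (xh + 1 - xl).toNat = NX := by omega
  have ey : (yh + 1 - yl).toNat = NY := by omega
  have ez : (zh + 1 - zl).toNat = NZ := by omega
  have hxr : PySem.List.pyRange xl (xh + 1) 1 = (List.range NX).map (fun (k : Nat) => xl + (k : Int)) := by
    rw [PySem.List.pyRange_one, ex]
  have hyr : PySem.List.pyRange yl (yh + 1) 1 = (List.range NY).map (fun (k : Nat) => yl + (k : Int)) := by
    rw [PySem.List.pyRange_one, ey]
  have hzr : PySem.List.pyRange zl (zh + 1) 1 = (List.range NZ).map (fun (k : Nat) => zl + (k : Int)) := by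
    rw [PySem.List.pyRange_one, ez]
  rw [hxr, hyr, hzr, List.flatMap_map]
  apply flatMap_congr_mem
  intro ix _
  rw [List.flatMap_map, range_mul_map NY NZ]
  apply flatMap_congr_mem
  intro iy hiy
  rw [List.map_map]
  apply List.map_congr_left
  intro iz hiz
  rw [List.mem_range] at hiy hiz
  have harith : ix * (NY * NZ) + (iy * NZ + iz) = (ix * NY + iy) * NZ + iz := by ring
  have h1 := nat_decode NZ (ix * NY + iy) iz hNZpos hiz
  have h2 := nat_decode NY ix iy hNYpos hiy
  simp only [Function.comp, harith, ← hNY, ← hNZ, PySem.Int.floordiv_natCast,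
    PySem.Int.mod_natCast, h1.1, h1.2, h2.1, h2.2]

theorem cuboids_eq (x_min x_max y_min y_max z_min z_max : Int) :
    cuboids x_min x_max y_min y_max z_min z_max = cuboids_alt x_min x_max y_min y_max z_min z_max := by
  unfold cuboids cuboids_alt
  rw [guard_eq, guard_eq, guard_eq]
  by_cases h : max x_min (-50) ≤ min x_max 50 ∧ max y_min (-50) ≤ min y_max 50 ∧
      max z_min (-50) ≤ min z_max 50
  · obtain ⟨hx, hy, hz⟩ := h
    rw [if_pos (by simp only [Bool.and_eq_true, decide_eq_true_eq]; exact ⟨⟨hx, hy⟩, hz⟩),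
      if_neg (by omega), f_clamp_lo x_min x_max hx, f_clamp_hi x_min x_max hx,
      f_clamp_lo y_min y_max hy, f_clamp_hi y_min y_max hy,
      f_clamp_lo z_min z_max hz, f_clamp_hi z_min z_max hz]
    exact flat_eq (max x_min (-50)) (min x_max 50) (max y_min (-50)) (min y_max 50)
      (max z_min (-50)) (min z_max 50)
      ((min x_max 50 - max x_min (-50) + 1).toNat)
      ((min y_max 50 - max y_min (-50) + 1).toNat)
      ((min z_max 50 - max z_min (-50) + 1).toNat)
      (by omega) (by omega) (by omega) (by omega) (by omega)
  · rw [if_neg (by simp only [Bool.and_eq_true, decide_eq_true_eq]; omega),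
      if_pos (by omega)]

-- ===== VERDICT (by name: the statement is the Claim_ definition above) =====
theorem cuboids_spec : Claim_equal_cuboids := by
  intro a b c d e g _
  unfold Spec_cuboids
  exact cuboids_eq a b c d e g
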